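-- pv_equiv track=rewrite | github.com/Laionik/System_rekomendacyjny | main.py | findSameUsers
-- ===== SOURCE A (Python) =====
-- def findSameUsers(user_list, same_gender_list, same_age_list, same_occupation_list):
--     for user in user_list:
--         temp_user = str.split(user, '|')
--         for to_compare in user_list:
--             temp_to_compare = str.split(to_compare, '|')
--             if temp_to_compare[0] != temp_user[0]:
--                 if temp_to_compare[2] == temp_user[2]:
--                     same_gender_list[int(temp_user[0]) - 1].append(temp_to_compare[0])
--
--                 if temp_to_compare[2] == temp_user[2] and abs(int(temp_to_compare[1]) - int(temp_user[1])) <= 5: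
--                     same_age_list[int(temp_user[0]) - 1].append(temp_to_compare[0])
--
--                 if temp_to_compare[2] == temp_user[2] and temp_to_compare[3] == temp_user[3] and abs(int(temp_to_compare[1]) - int(temp_user[1])) <= 5:
--                     same_occupation_list[int(temp_user[0]) - 1].append(temp_to_compare[0])
--
--     return same_gender_list, same_age_list, same_occupation_list
-- ===== SOURCE B (Python) =====
-- def findSameUsers(user_list, same_gender_list, same_age_list, same_occupation_list):
--     # Parse each record once, group parsed records by gender field in a dict,
--     # then scan only the user's own gender group (A re-splits and scans all users, O(n^2) splits).
--     parsed = [str.split(u, '|') for u in user_list]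
--     groups = {}
--     for f in parsed:
--         k = f[2] if len(f) > 2 else None
--         groups.setdefault(k, []).append(f)
--     for f in parsed:
--         k = f[2] if len(f) > 2 else None
--         for g in groups[k]:
--             if g[0] != f[0]:
--                 idx = int(f[0]) - 1
--                 same_gender_list[idx].append(g[0])
--                 if abs(int(g[1]) - int(f[1])) <= 5:
--                     same_age_list[idx].append(g[0])
--                     if g[3] == f[3]:
--                         same_occupation_list[idx].append(g[0])
--     return same_gender_list, same_age_list, same_occupation_list
-- ===== Notes on version B (the rewrite author's own statement) =====
-- stated objective: faster
-- what changed: B parses every record once and groups the parsed records by gender field in a dict, then scans only the user's own gender group (nesting the age and occupation checks), instead of A's nested loop that re-splits and re-scans the whole user list for every user.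
import Mathlib
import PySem

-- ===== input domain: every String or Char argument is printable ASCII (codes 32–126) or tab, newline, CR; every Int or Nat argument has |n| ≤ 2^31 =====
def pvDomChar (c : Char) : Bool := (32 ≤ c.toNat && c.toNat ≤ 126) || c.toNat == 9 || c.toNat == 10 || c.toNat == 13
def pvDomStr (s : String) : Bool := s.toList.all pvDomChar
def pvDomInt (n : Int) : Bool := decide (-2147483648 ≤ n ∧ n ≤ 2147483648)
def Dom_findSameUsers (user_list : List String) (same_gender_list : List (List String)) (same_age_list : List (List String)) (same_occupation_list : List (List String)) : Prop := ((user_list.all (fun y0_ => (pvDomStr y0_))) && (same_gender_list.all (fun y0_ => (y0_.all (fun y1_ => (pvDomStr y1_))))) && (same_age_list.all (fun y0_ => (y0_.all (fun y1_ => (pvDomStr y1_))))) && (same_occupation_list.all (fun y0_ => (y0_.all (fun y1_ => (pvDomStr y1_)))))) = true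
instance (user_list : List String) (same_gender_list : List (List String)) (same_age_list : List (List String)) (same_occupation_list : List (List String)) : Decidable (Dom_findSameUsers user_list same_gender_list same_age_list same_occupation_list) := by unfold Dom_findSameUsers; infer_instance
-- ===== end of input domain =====

-- ===== PORT A =====
-- B re-implements A (which mutates and returns the three bucket lists; the proved equivalence
-- is about the returned values, and B performs the same in-place appends): parse once + gender-dict
-- grouping instead of A's nested full rescan with re-splitting; objective: faster (constant factor).

-- shared primitive: `lst[i].append(x)` on a list of buckets (Python index, negative allowed;
-- total form — Pre_ guarantees the index is in range wherever an append happens)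
def pyAppendAt (lss : List (List String)) (i : Int) (x : String) : List (List String) :=
  PySem.List.pySetD lss i (PySem.List.pyGetD lss i [] ++ [x])

-- str.split(u, '|')
def splitU (u : String) : List String := (PySem.Str.split? u "|").getD []

-- body of A's inner loop (fu = the parsed outer user, v = the raw inner user)
def innerStepA (fu : List String)
    (st : List (List String) × List (List String) × List (List String)) (v : String) :
    List (List String) × List (List String) × List (List String) :=
  let fv := splitU v
  if fv.getD 0 "" ≠ fu.getD 0 "" then
    let idx : Int := (PySem.Int.ofStr? (fu.getD 0 "")).getD 0 - 1
    let st1 := if fv.getD 2 "" = fu.getD 2 "" then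
        (pyAppendAt st.1 idx (fv.getD 0 ""), st.2.1, st.2.2) else st
    let st2 := if fv.getD 2 "" = fu.getD 2 "" ∧
        ((PySem.Int.ofStr? (fv.getD 1 "")).getD 0 - (PySem.Int.ofStr? (fu.getD 1 "")).getD 0).natAbs ≤ 5 then
        (st1.1, pyAppendAt st1.2.1 idx (fv.getD 0 ""), st1.2.2) else st1
    let st3 := if fv.getD 2 "" = fu.getD 2 "" ∧ fv.getD 3 "" = fu.getD 3 "" ∧
        ((PySem.Int.ofStr? (fv.getD 1 "")).getD 0 - (PySem.Int.ofStr? (fu.getD 1 "")).getD 0).natAbs ≤ 5 then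
        (st2.1, st2.2.1, pyAppendAt st2.2.2 idx (fv.getD 0 "")) else st2
    st3
  else st

def findSameUsers (user_list : List String) (same_gender_list : List (List String)) (same_age_list : List (List String)) (same_occupation_list : List (List String)) : List (List (List String)) :=
  let st := user_list.foldl
    (fun st user => user_list.foldl (innerStepA (splitU user)) st)
    (same_gender_list, same_age_list, same_occupation_list)
  [st.1, st.2.1, st.2.2]

-- ===== PORT B =====
-- `f[2] if len(f) > 2 else None`
def genderKey (f : List String) : Option String := f[2]?

-- the gender-grouping dict (groups.setdefault(k, []).append(f))
def groupsB (parsed : List (List String)) : PySem.Dict (Option String) (List (List String)) :=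
  parsed.foldl (fun d f => d.modify (genderKey f) [] (· ++ [f])) PySem.Dict.empty

-- body of B's inner loop (f = parsed outer user, g = parsed group member)
def innerStepB (f : List String)
    (st : List (List String) × List (List String) × List (List String)) (g : List String) :
    List (List String) × List (List String) × List (List String) :=
  if g.getD 0 "" ≠ f.getD 0 "" then
    let idx : Int := (PySem.Int.ofStr? (f.getD 0 "")).getD 0 - 1
    let st1 := (pyAppendAt st.1 idx (g.getD 0 ""), st.2.1, st.2.2)
    if ((PySem.Int.ofStr? (g.getD 1 "")).getD 0 - (PySem.Int.ofStr? (f.getD 1 "")).getD 0).natAbs ≤ 5 then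
      let st2 := (st1.1, pyAppendAt st1.2.1 idx (g.getD 0 ""), st1.2.2)
      if g.getD 3 "" = f.getD 3 "" then (st2.1, st2.2.1, pyAppendAt st2.2.2 idx (g.getD 0 "")) else st2
    else st1
  else st

def findSameUsers_alt (user_list : List String) (same_gender_list : List (List String)) (same_age_list : List (List String)) (same_occupation_list : List (List String)) : List (List (List String)) :=
  let parsed := user_list.map splitU
  let groups := groupsB parsed
  let st := parsed.foldl
    (fun st f => (groups.getD (genderKey f) []).foldl (innerStepB f) st)
    (same_gender_list, same_age_list, same_occupation_list)
  [st.1, st.2.1, st.2.2]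

-- ===== PRECONDITION & SPEC =====
-- Pre_ is exactly the set of inputs on which the Python A returns normally: whenever two users have
-- different id fields both must have ≥ 3 fields (gender access), and whenever such a pair also shares
-- the gender field both need ≥ 4 fields, int-parseable id/age fields, and the (possibly negative)
-- bucket index id-1 must be in range of each list that is actually appended to.
def Pre_findSameUsers (user_list : List String) (same_gender_list : List (List String)) (same_age_list : List (List String)) (same_occupation_list : List (List String)) : Prop :=
  ∀ u ∈ user_list, ∀ v ∈ user_list,
    (splitU v).getD 0 "" ≠ (splitU u).getD 0 "" →
      3 ≤ (splitU u).length ∧ 3 ≤ (splitU v).length ∧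
      ((splitU v).getD 2 "" = (splitU u).getD 2 "" →
        4 ≤ (splitU u).length ∧ 4 ≤ (splitU v).length ∧
        (PySem.Int.ofStr? ((splitU u).getD 0 "")).isSome = true ∧
        (PySem.Int.ofStr? ((splitU v).getD 1 "")).isSome = true ∧
        (PySem.Int.ofStr? ((splitU u).getD 1 "")).isSome = true ∧
        PySem.Raise.InRange same_gender_list.length ((PySem.Int.ofStr? ((splitU u).getD 0 "")).getD 0 - 1) ∧
        (((PySem.Int.ofStr? ((splitU v).getD 1 "")).getD 0 - (PySem.Int.ofStr? ((splitU u).getD 1 "")).getD 0).natAbs ≤ 5 →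
          PySem.Raise.InRange same_age_list.length ((PySem.Int.ofStr? ((splitU u).getD 0 "")).getD 0 - 1) ∧
          ((splitU v).getD 3 "" = (splitU u).getD 3 "" →
            PySem.Raise.InRange same_occupation_list.length ((PySem.Int.ofStr? ((splitU u).getD 0 "")).getD 0 - 1))))

instance (user_list : List String) (same_gender_list : List (List String)) (same_age_list : List (List String)) (same_occupation_list : List (List String)) : Decidable (Pre_findSameUsers user_list same_gender_list same_age_list same_occupation_list) := by unfold Pre_findSameUsers; infer_instance

def pvWitness_findSameUsers : List String × List (List String) × List (List String) × List (List String) :=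
  (["1|20|M|art", "2|23|M|law"], [[], []], [[], []], [[], []])

def Spec_findSameUsers (user_list : List String) (same_gender_list : List (List String)) (same_age_list : List (List String)) (same_occupation_list : List (List String)) (out : List (List (List String))) : Prop := out = findSameUsers_alt user_list same_gender_list same_age_list same_occupation_list
instance (user_list : List String) (same_gender_list : List (List String)) (same_age_list : List (List String)) (same_occupation_list : List (List String)) (out : List (List (List String))) : Decidable (Spec_findSameUsers user_list same_gender_list same_age_list same_occupation_list out) := by unfold Spec_findSameUsers; infer_instance

-- ===== CLAIM (what is proved, stated in full; the proofs are below) =====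
def Claim_equal_findSameUsers : Prop := ∀ (user_list : List String) (same_gender_list : List (List String)) (same_age_list : List (List String)) (same_occupation_list : List (List String)), Dom_findSameUsers user_list same_gender_list same_age_list same_occupation_list → Pre_findSameUsers user_list same_gender_list same_age_list same_occupation_list → Spec_findSameUsers user_list same_gender_list same_age_list same_occupation_list (findSameUsers user_list same_gender_list same_age_list same_occupation_list)

-- ===== LEMMAS AND PROOFS =====

-- looking a gender key up in the grouping dict yields exactly the parsed users with that key, in order
lemma groupsB_getD (parsed : List (List String)) (c : Option String) :
    (groupsB parsed).getD c [] = parsed.filter (fun g => genderKey g == c) := by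
  have h := PySem.Dict.getD_foldl_modify_append
    (l := parsed.map (fun g => (genderKey g, g)))
    (d := (PySem.Dict.empty : PySem.Dict (Option String) (List (List String)))) (c := c)
  rw [List.foldl_map] at h
  unfold groupsB
  rw [h]
  simp only [PySem.Dict.getD_empty, List.nil_append, List.filter_map, List.map_map]
  simp [Function.comp_def]

-- per-pair step agreement, assuming the field-count facts Pre_ provides for this pair
lemma step_agree (fu : List String) (v : String)
    (h3 : (splitU v).getD 0 "" ≠ fu.getD 0 "" → 3 ≤ fu.length ∧ 3 ≤ (splitU v).length)
    (st : List (List String) × List (List String) × List (List String)) :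
    innerStepA fu st v =
      if genderKey (splitU v) == genderKey fu then innerStepB fu st (splitU v) else st := by
  by_cases h0 : (splitU v).getD 0 "" = fu.getD 0 ""
  · have hB : innerStepB fu st (splitU v) = st := by
      simp only [innerStepB, if_neg (not_not_intro h0)]
    simp only [innerStepA, if_neg (not_not_intro h0), hB, ite_self]
  · obtain ⟨h3u, h3v⟩ := h3 h0
    have hu2 : fu[2]? = some (fu.getD 2 "") := by
      rw [List.getD_eq_getElem?_getD, List.getElem?_eq_getElem (by omega)]; rfl
    have hv2 : (splitU v)[2]? = some ((splitU v).getD 2 "") := by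
      rw [List.getD_eq_getElem?_getD, List.getElem?_eq_getElem (by omega)]; rfl
    by_cases hg : (splitU v).getD 2 "" = fu.getD 2 ""
    · have hkey : (genderKey (splitU v) == genderKey fu) = true := by
        show ((splitU v)[2]? == fu[2]?) = true
        rw [hu2, hv2, hg]
        exact beq_self_eq_true _
      rw [if_pos hkey]
      simp only [innerStepA, innerStepB, if_pos h0, hg, true_and]
      by_cases hage : ((PySem.Int.ofStr? ((splitU v).getD 1 "")).getD 0 - (PySem.Int.ofStr? (fu.getD 1 "")).getD 0).natAbs ≤ 5
      · by_cases hocc : (splitU v).getD 3 "" = fu.getD 3 ""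
        · simp only [if_pos hage, if_pos hocc, if_pos (And.intro hocc hage), if_true]
        · simp only [if_pos hage, if_neg hocc,
            if_neg (fun h => hocc (And.left h)), if_true]
      · simp only [if_neg hage, if_neg (fun h : _ ∧ _ => hage h.2), if_true]
    · have hkey : ¬ ((genderKey (splitU v) == genderKey fu) = true) := by
        show ¬ (((splitU v)[2]? == fu[2]?) = true)
        rw [hu2, hv2]
        simpa using hg
      rw [if_neg hkey]
      simp only [innerStepA, if_pos h0, if_neg hg, if_neg (fun h : _ ∧ _ => hg h.1)]

-- per-user loop agreement
lemma inner_agree (ul : List String) (u : String) (hu : u ∈ ul)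
    (hP : ∀ u' ∈ ul, ∀ v ∈ ul, (splitU v).getD 0 "" ≠ (splitU u').getD 0 "" →
            3 ≤ (splitU u').length ∧ 3 ≤ (splitU v).length)
    (st : List (List String) × List (List String) × List (List String)) :
    ul.foldl (innerStepA (splitU u)) st =
      ((groupsB (ul.map splitU)).getD (genderKey (splitU u)) []).foldl (innerStepB (splitU u)) st := by
  rw [groupsB_getD, ← PySem.List.foldl_if_eq_foldl_filter, List.foldl_map]
  exact PySem.List.foldl_congr_mem
    (l := ul)
    (f := innerStepA (splitU u))
    (g := fun st v => if genderKey (splitU v) == genderKey (splitU u) then innerStepB (splitU u) st (splitU v) else st)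
    (init := st)
    (fun st' v hv => step_agree (splitU u) v (hP u hu v hv) st')

-- ===== VERDICT (by name: the statement is the Claim_ definition above) =====
theorem findSameUsers_spec : Claim_equal_findSameUsers := by
  intro ul gl al ol _hDom hPre
  unfold Spec_findSameUsers findSameUsers findSameUsers_alt
  have hP : ∀ u' ∈ ul, ∀ v ∈ ul, (splitU v).getD 0 "" ≠ (splitU u').getD 0 "" →
      3 ≤ (splitU u').length ∧ 3 ≤ (splitU v).length := by
    intro u' hu' v hv hne
    exact ⟨(hPre u' hu' v hv hne).1, (hPre u' hu' v hv hne).2.1⟩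
  have key : ul.foldl (fun st user => ul.foldl (innerStepA (splitU user)) st) (gl, al, ol)
      = (ul.map splitU).foldl
          (fun st f => ((groupsB (ul.map splitU)).getD (genderKey f) []).foldl (innerStepB f) st)
          (gl, al, ol) := by
    rw [List.foldl_map]
    exact PySem.List.foldl_congr_mem
      (l := ul)
      (f := fun st user => ul.foldl (innerStepA (splitU user)) st)
      (g := fun st user => ((groupsB (ul.map splitU)).getD (genderKey (splitU user)) []).foldl (innerStepB (splitU user)) st)
      (init := (gl, al, ol))
      (fun st u hu => inner_agree ul u hu hP st)
  simp only [key]
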